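-- pv_equiv track=rewrite | github.com/LaCoddde/face-reco | src/utils/doc_proc.py | extract_titles_and_content
-- ===== SOURCE A (Python) =====
-- def extract_titles_and_content(text):
--     lines = text.split('\n')
--     data = {}
--     current_title = None
--
--     for line in lines:
--         if line.strip() == '':
--             continue
--
--         if line.strip().isupper():
--             current_title = line.strip()
--             data[current_title] = []
--         elif current_title:
--             data[current_title].append(line.strip())
--
--     return data
-- ===== SOURCE B (Python) =====
-- def _is_title(s):
--     return s != '' and s.isupper()
--
-- def _span_not_title(ls):
--     """Split ls into (longest prefix of non-title lines, remaining suffix)."""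
--     for k, s in enumerate(ls):
--         if _is_title(s):
--             return ls[:k], ls[k:]
--     return ls, []
--
-- def extract_titles_and_content(text):
--     stripped = [ln.strip() for ln in text.split('\n')]
--     data = {}
--     rest = stripped
--     while rest:
--         head, tail = rest[0], rest[1:]
--         if _is_title(head):
--             body, rest = _span_not_title(tail)
--             data[head] = [s for s in body if s]
--         else:
--             rest = tail
--     return data
-- ===== Notes on version B (the rewrite author's own statement) =====
-- stated objective: alternative
-- what changed: A is a line-by-line state machine that tracks a current title and appends each stripped line to a growing dict entry; B pre-strips all lines once and then consumes them segment-wise, splitting off each title's whole block of following non-title lines with a span helper and assigning the filtered block to the dict in one step.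
import Mathlib
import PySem

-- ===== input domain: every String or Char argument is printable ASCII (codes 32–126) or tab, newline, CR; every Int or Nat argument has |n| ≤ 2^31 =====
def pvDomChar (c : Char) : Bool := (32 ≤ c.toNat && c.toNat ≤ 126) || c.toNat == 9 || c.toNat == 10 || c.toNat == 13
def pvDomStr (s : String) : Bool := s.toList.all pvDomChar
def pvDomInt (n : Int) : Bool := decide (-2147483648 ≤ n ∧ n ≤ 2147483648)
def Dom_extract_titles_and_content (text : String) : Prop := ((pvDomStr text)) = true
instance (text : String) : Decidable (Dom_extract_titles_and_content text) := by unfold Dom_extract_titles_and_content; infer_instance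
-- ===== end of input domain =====

-- B replaces A's one-line-at-a-time current-title state machine by a segment-wise pass
-- (strip all lines once, then split off each title's whole block with a span helper); alternative
-- decomposition, same cost.

-- shared primitive ports (both Pythons call the same built-ins):
-- str.isupper(): at least one cased character and no lowercase one — exact on printable ASCII (Dom),
-- where the cased characters are exactly a-z/A-Z
def pyStrIsupper (s : String) : Bool :=
  s.toList.any PySem.Chars.isupper && !(s.toList.any PySem.Chars.islower)

-- text.split('\n')
def pyLines (text : String) : List String :=
  (PySem.Chars.splitOn text.toList ['\n']).map String.ofList

-- ===== PORT A =====
-- one loop iteration of A: strip the line, skip empties, reset on a title, else append to the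
-- current title's entry (Python's data[current_title].append never sees a missing key — the key is
-- inserted together with current_title — so Dict.modify with default [] is exact here)
def aStep (st : PySem.Dict String (List String) × Option String) (line : String) :
    PySem.Dict String (List String) × Option String :=
  let s := PySem.Str.strip line
  if s = "" then st
  else if pyStrIsupper s then (st.1.insert s [], some s)
  else match st.2 with
    | some t => (st.1.modify t [] (fun v => v ++ [s]), st.2)
    | none => st

def extract_titles_and_content (text : String) : List (String × List String) :=
  ((pyLines text).foldl aStep (PySem.Dict.empty, none)).1.items

-- ===== PORT B =====
def altIsTitle (s : String) : Bool := !(s == "") && pyStrIsupper s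

-- B's _span_not_title: accumulate non-title lines into body until a title (or the end)
def altSpan (body : List String) : List String → List String × List String
  | [] => (body, [])
  | s :: ls => if altIsTitle s then (body, s :: ls) else altSpan (body ++ [s]) ls

-- termination measure for altGo (cited by its decreasing_by)
theorem altSpan_snd_length : ∀ (ls body : List String), ((altSpan body ls).2).length ≤ ls.length := by
  intro ls
  induction ls with
  | nil => intro body; simp [altSpan]
  | cons s ls ih =>
      intro body
      simp only [altSpan]
      split
      · simp
      · exact Nat.le_succ_of_le (ih (body ++ [s]))

-- B's while loop: skip non-title lines; at a title, split off its whole segment and assign it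
def altGo (data : PySem.Dict String (List String)) : List String → PySem.Dict String (List String)
  | [] => data
  | head :: tail =>
    if altIsTitle head then
      altGo (data.insert head ((altSpan [] tail).1.filter (fun s => s ≠ ""))) (altSpan [] tail).2
    else altGo data tail
termination_by l => l.length
decreasing_by
  · exact Nat.lt_succ_of_le (altSpan_snd_length tail [])
  · simp

def extract_titles_and_content_alt (text : String) : List (String × List String) :=
  (altGo PySem.Dict.empty ((pyLines text).map PySem.Str.strip)).items

-- ===== PRECONDITION & SPEC =====
def Spec_extract_titles_and_content (text : String) (out : List (String × List String)) : Prop := out = extract_titles_and_content_alt text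
instance (text : String) (out : List (String × List String)) : Decidable (Spec_extract_titles_and_content text out) := by unfold Spec_extract_titles_and_content; infer_instance

-- ===== CLAIM (what is proved, stated in full; the proofs are below) =====
def Claim_equal_extract_titles_and_content : Prop := ∀ (text : String), Dom_extract_titles_and_content text → Spec_extract_titles_and_content text (extract_titles_and_content text)

-- ===== LEMMAS AND PROOFS =====

-- A's step on an already-stripped line
def bStep (st : PySem.Dict String (List String) × Option String) (s : String) :
    PySem.Dict String (List String) × Option String :=
  if s = "" then st
  else if pyStrIsupper s then (st.1.insert s [], some s)
  else match st.2 with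
    | some t => (st.1.modify t [] (fun v => v ++ [s]), st.2)
    | none => st

theorem foldl_aStep (ls : List String) (st : PySem.Dict String (List String) × Option String) :
    ls.foldl aStep st = (ls.map PySem.Str.strip).foldl bStep st := by
  rw [List.foldl_map]
  rfl

theorem modify_insert (d : PySem.Dict String (List String)) (t : String) (v : List String)
    (f : List String → List String) :
    (d.insert t v).modify t [] f = d.insert t (f v) := by
  simp [PySem.Dict.modify, PySem.Dict.getD_insert_self, PySem.Dict.insert_insert_self]

theorem altSpan_eq (ls acc : List String) :
    altSpan acc ls = (acc ++ ls.takeWhile (fun x => !altIsTitle x),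
                      ls.dropWhile (fun x => !altIsTitle x)) := by
  induction ls generalizing acc with
  | nil => simp [altSpan]
  | cons s ls ih =>
      by_cases h : altIsTitle s = true
      · simp [altSpan, h]
      · simp only [Bool.not_eq_true] at h
        simp [altSpan, h, ih]

theorem seg_fold : ∀ (T : List String), (∀ s ∈ T, altIsTitle s = false) →
    ∀ (d : PySem.Dict String (List String)) (t : String) (v : List String),
    T.foldl bStep (d.insert t v, some t) =
      (d.insert t (v ++ T.filter (fun s => s ≠ "")), some t) := by
  intro T
  induction T with
  | nil => intro _ d t v; simp
  | cons s T ih =>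
      intro h d t v
      have hs := h s (List.mem_cons_self ..)
      by_cases he : s = ""
      · subst he
        simpa using ih (fun x hx => h x (List.mem_cons_of_mem _ hx)) d t v
      · have hup : pyStrIsupper s = false := by
          by_contra hu
          simp [altIsTitle, he, Bool.not_eq_false] at hs hu
          simp [hs] at hu
        simp only [List.foldl_cons, bStep, if_neg he, hup, Bool.false_eq_true, if_false]
        rw [modify_insert]
        rw [ih (fun x hx => h x (List.mem_cons_of_mem _ hx)) d t (v ++ [s])]
        simp [he]

theorem main_go : ∀ (n : ℕ) (ls : List String), ls.length ≤ n →
    ∀ (d : PySem.Dict String (List String)),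
    (ls.foldl bStep (d, none)).1 = altGo d ls := by
  intro n
  induction n with
  | zero =>
      intro ls h d
      have : ls = [] := List.eq_nil_of_length_eq_zero (Nat.le_zero.mp h)
      subst this
      simp [altGo]
  | succ n ih =>
      intro ls h d
      match ls with
      | [] => simp [altGo]
      | s :: tl =>
        by_cases hT : altIsTitle s = true
        · have he : ¬ s = "" := by
            intro hc; subst hc; simp [altIsTitle] at hT
          have hup : pyStrIsupper s = true := by
            simp [altIsTitle, Bool.and_eq_true] at hT; exact hT.2
          have hlen : tl.length ≤ n := by simpa using h
          have hTW : ∀ x ∈ tl.takeWhile (fun x => !altIsTitle x), altIsTitle x = false := by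
            intro x hx
            have := List.mem_takeWhile_imp hx
            simpa using this
          have hsplit : tl.takeWhile (fun x => !altIsTitle x) ++
              tl.dropWhile (fun x => !altIsTitle x) = tl :=
            List.takeWhile_append_dropWhile
          have step1 : (s :: tl).foldl bStep (d, none) =
              (tl.dropWhile (fun x => !altIsTitle x)).foldl bStep
                (d.insert s ((tl.takeWhile (fun x => !altIsTitle x)).filter (fun x => x ≠ "")),
                 some s) := by
            conv_lhs => rw [List.foldl_cons, ← hsplit]
            rw [List.foldl_append]
            have : bStep (d, none) s = (d.insert s [], some s) := by
              simp [bStep, he, hup]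
            rw [this, seg_fold _ hTW]
            simp
          have hgo : altGo d (s :: tl) =
              altGo (d.insert s ((tl.takeWhile (fun x => !altIsTitle x)).filter (fun x => x ≠ "")))
                (tl.dropWhile (fun x => !altIsTitle x)) := by
            rw [altGo]
            simp [hT, altSpan_eq]
          rw [step1, hgo]
          have hRlen : (tl.dropWhile (fun x => !altIsTitle x)).length ≤ n :=
            le_trans (List.length_dropWhile_le _ _) hlen
          cases hR : tl.dropWhile (fun x => !altIsTitle x) with
          | nil => simp [altGo]
          | cons r rs =>
              have hr : altIsTitle r = true := by
                have := List.dropWhile_get_zero_not (p := fun x => !altIsTitle x) (l := tl)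
                  (by simp [hR])
                simpa [hR] using this
              have hrlen : (r :: rs).length ≤ n := by rw [← hR]; exact hRlen
              have hre : ¬ r = "" := by
                intro hc; subst hc; simp [altIsTitle] at hr
              have hrup : pyStrIsupper r = true := by
                simp [altIsTitle, Bool.and_eq_true] at hr; exact hr.2
              -- from (d', some s) and from (d', none) the first step on a title coincides
              set d' := d.insert s ((tl.takeWhile (fun x => !altIsTitle x)).filter (fun x => x ≠ ""))
              have lift : ((r :: rs).foldl bStep (d', some s)).1 =
                  ((r :: rs).foldl bStep (d', none)).1 := by
                simp only [List.foldl_cons]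
                have h1 : bStep (d', some s) r = (d'.insert r [], some r) := by
                  simp [bStep, hre, hrup]
                have h2 : bStep (d', none) r = (d'.insert r [], some r) := by
                  simp [bStep, hre, hrup]
                rw [h1, h2]
              rw [lift, ih _ hrlen d']
        · -- non-title head: both sides skip it
          have hlen : tl.length ≤ n := by simpa using h
          have hstep : bStep (d, none) s = (d, none) := by
            by_cases he : s = ""
            · simp [bStep, he]
            · have hup : pyStrIsupper s = false := by
                by_contra hu
                simp only [Bool.not_eq_false] at hu
                exact hT (by simp [altIsTitle, he, hu])
              simp [bStep, he, hup]
          rw [List.foldl_cons, hstep, ih _ hlen d, altGo]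
          simp [hT]

-- ===== VERDICT (by name: the statement is the Claim_ definition above) =====
theorem extract_titles_and_content_spec : Claim_equal_extract_titles_and_content := by
  intro text _
  unfold Spec_extract_titles_and_content extract_titles_and_content extract_titles_and_content_alt
  rw [foldl_aStep, main_go ((pyLines text).map PySem.Str.strip).length _ le_rfl]
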